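-- pv_equiv track=rewrite | github.com/ashenoy95/leetcode | python/minGeneticMutation.py | succFunc
-- ===== SOURCE A (Python) =====
-- def succFunc(gene, bank_dict):
--     valid_mutations = set()
--     choices = ['A', 'C', 'G', 'T']
--
--     for choice in choices:
--         for i in range(len(gene)):
--             if gene[i]!=choice:
--                 temp = gene[:i] + choice + gene[i+1:]
--                 if ''.join(temp) in bank_dict:
--                     valid_mutations.add(temp)
--     return valid_mutations
-- ===== SOURCE B (Python) =====
-- def succFunc(gene, bank_dict):
--     # Index each bank gene that is exactly one substitution away from gene
--     # under that substitution (new character, position), then collect the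
--     # genes reachable by a valid nucleotide substitution.
--     by_sub = {}
--     for cand in bank_dict:
--         if len(cand) == len(gene):
--             diffs = [i for i in range(len(gene)) if cand[i] != gene[i]]
--             if len(diffs) == 1:
--                 by_sub[(cand[diffs[0]], diffs[0])] = cand
--     return {by_sub[c, i] for c in 'ACGT' for i in range(len(gene)) if (c, i) in by_sub}
-- ===== Notes on version B (the rewrite author's own statement) =====
-- stated objective: faster
-- what changed: Instead of generating all 4*L one-character mutations of gene (each an O(L) string build and hash), B scans the bank once, indexing each key of gene's length at Hamming distance exactly 1 under its single substitution (char, position), and answers the 4*L substitution queries by dictionary lookup without building mutated strings.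
import Mathlib
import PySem

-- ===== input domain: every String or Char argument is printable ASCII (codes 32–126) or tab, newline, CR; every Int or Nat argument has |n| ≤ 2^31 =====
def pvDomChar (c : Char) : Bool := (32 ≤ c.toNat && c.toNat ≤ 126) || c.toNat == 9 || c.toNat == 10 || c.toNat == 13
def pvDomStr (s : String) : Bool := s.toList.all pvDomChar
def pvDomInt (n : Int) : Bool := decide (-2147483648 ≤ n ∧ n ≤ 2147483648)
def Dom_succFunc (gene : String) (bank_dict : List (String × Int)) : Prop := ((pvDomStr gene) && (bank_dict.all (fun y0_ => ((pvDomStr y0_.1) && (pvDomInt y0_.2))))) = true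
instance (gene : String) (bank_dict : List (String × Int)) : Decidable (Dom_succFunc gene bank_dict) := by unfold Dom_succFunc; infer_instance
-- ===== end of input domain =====

-- B indexes the bank once by each gene's single substitution (char, position) and answers
-- the 4·L substitution queries by dictionary lookup instead of building and hashing 4·L
-- mutated strings (objective: faster; measured faster in a timing run).


-- ===== PORT A =====
-- for choice in 'ACGT': for i in range(len(gene)): build gene[:i]+choice+gene[i+1:],
-- add it to the result set when it is a key of bank_dict.
-- (pyGetD is used for gene[i]: i ranges over range(len(gene)), always in range.)
def succFunc (gene : String) (bank_dict : List (String × Int)) : List String :=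
  let choices : List Char := ['A', 'C', 'G', 'T']
  choices.foldl
    (fun valid_mutations choice =>
      (PySem.List.pyRange 0 (PySem.Str.len gene) 1).foldl
        (fun vm i =>
          if PySem.List.pyGetD gene.toList i ' ' ≠ choice then
            let temp := String.ofList
              (PySem.List.slice gene.toList none (some i) ++ [choice] ++
               PySem.List.slice gene.toList (some (i + 1)) none)
            if (bank_dict.map Prod.fst).contains temp then PySem.Set.add vm temp else vm
          else vm)
        valid_mutations)
    ([] : PySem.Set String)

-- ===== PORT B =====
-- One pass over the bank: each key of gene's length whose position-wise diff list is a
-- singleton [i] is stored in by_sub under (cand[i], i); then the set comprehension over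
-- c in 'ACGT', i in range(len(gene)) collects by_sub[c, i] where present.
-- loop body of B's bank scan: store a length-n candidate whose diff list with gene is
-- a singleton [i] under key (cand[i], i)
def bSubStep (gene : String) (n : Int) (d : PySem.Dict (Char × Int) String)
    (p : String × Int) : PySem.Dict (Char × Int) String :=
  let cand := p.1
  if PySem.Str.len cand = n then
    match (PySem.List.pyRange 0 n 1).filter
        (fun i => PySem.List.pyGetD cand.toList i ' ' ≠ PySem.List.pyGetD gene.toList i ' ') with
    | [i] => d.insert (PySem.List.pyGetD cand.toList i ' ', i) cand
    | _ => d
  else d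

def succFunc_alt (gene : String) (bank_dict : List (String × Int)) : List String :=
  let n := PySem.Str.len gene
  let by_sub : PySem.Dict (Char × Int) String :=
    bank_dict.foldl (bSubStep gene n) PySem.Dict.empty
  (['A', 'C', 'G', 'T'] : List Char).foldl
    (fun vm c =>
      (PySem.List.pyRange 0 n 1).foldl
        (fun vm i =>
          match PySem.Dict.get? by_sub (c, i) with
          | some v => PySem.Set.add vm v
          | none => vm)
        vm)
    ([] : PySem.Set String)

-- ===== PRECONDITION & SPEC =====
def Spec_succFunc (gene : String) (bank_dict : List (String × Int)) (out : List String) : Prop := out = succFunc_alt gene bank_dict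
instance (gene : String) (bank_dict : List (String × Int)) (out : List String) : Decidable (Spec_succFunc gene bank_dict out) := by unfold Spec_succFunc; infer_instance

-- ===== CLAIM (what is proved, stated in full; the proofs are below) =====
def Claim_equal_succFunc : Prop := ∀ (gene : String) (bank_dict : List (String × Int)), Dom_succFunc gene bank_dict → Spec_succFunc gene bank_dict (succFunc gene bank_dict)

-- ===== LEMMAS AND PROOFS =====

-- gene with position k replaced by c
def mutL (g : List Char) (c : Char) (k : Nat) : List Char := g.take k ++ c :: g.drop (k + 1)

lemma mutL_length (g : List Char) (c : Char) (k : Nat) (hk : k < g.length) :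
    (mutL g c k).length = g.length := by
  simp [mutL]; omega

lemma mutL_get? (g : List Char) (c : Char) (k : Nat) (hk : k < g.length) (j : Nat) :
    (mutL g c k)[j]? = if j = k then some c else g[j]? := by
  unfold mutL
  have htk : (g.take k).length = k := by simp; omega
  rcases lt_trichotomy j k with h | h | h
  · rw [List.getElem?_append_left (by omega), List.getElem?_take]
    simp [h, Nat.ne_of_lt h]
  · subst h
    rw [List.getElem?_append_right (by omega)]
    simp [htk]
  · rw [List.getElem?_append_right (by omega), htk]
    have h1 : j - k = (j - k - 1) + 1 := by omega
    rw [h1]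
    simp only [List.getElem?_cons_succ, List.getElem?_drop]
    rw [if_neg (by omega)]
    congr 1
    omega

lemma mutL_getD (g : List Char) (c : Char) (k : Nat) (hk : k < g.length) (j : Nat) (hj : j < g.length) :
    (mutL g c k).getD j ' ' = if j = k then c else g.getD j ' ' := by
  have h1 : j < (mutL g c k).length := by rw [mutL_length g c k hk]; exact hj
  rw [List.getD_eq_getElem _ _ h1, List.getD_eq_getElem _ _ hj]
  have := mutL_get? g c k hk j
  rw [List.getElem?_eq_getElem h1, List.getElem?_eq_getElem hj] at this
  split_ifs at this ⊢ with h
  · exact Option.some.inj this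
  · exact Option.some.inj this

-- B's diff list over Nat indices
lemma diffs_eq (g cs : List Char) (n : Nat) :
    (PySem.List.pyRange 0 (n : Int) 1).filter
        (fun i => decide (PySem.List.pyGetD cs i ' ' ≠ PySem.List.pyGetD g i ' '))
      = ((List.range n).filter (fun k => decide (cs.getD k ' ' ≠ g.getD k ' '))).map (fun k : Nat => (k : Int)) := by
  rw [PySem.List.pyRange_zero_nat n, List.filter_map]
  congr 1
  apply List.filter_congr
  intro k _
  simp [PySem.List.pyGetD_natCast, Function.comp]

lemma filter_range_singleton (p : Nat → Bool) (n k : Nat) :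
    (List.range n).filter p = [k] ↔ k < n ∧ p k = true ∧ ∀ j, j < n → p j = true → j = k := by
  constructor
  · intro h
    have hmem : ∀ j, j ∈ (List.range n).filter p ↔ j = k := by
      intro j; rw [h]; simp
    have hk := (hmem k).mpr rfl
    rw [List.mem_filter, List.mem_range] at hk
    refine ⟨hk.1, hk.2, ?_⟩
    intro j hj hpj
    exact (hmem j).mp (List.mem_filter.mpr ⟨List.mem_range.mpr hj, hpj⟩)
  · rintro ⟨hk, hpk, huniq⟩
    rw [← List.perm_singleton]
    rw [List.perm_ext_iff_of_nodup (List.nodup_range.filter _) (List.nodup_singleton k)]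
    intro j
    rw [List.mem_filter, List.mem_range, List.mem_singleton]
    constructor
    · rintro ⟨hj, hpj⟩; exact huniq j hj hpj
    · rintro rfl; exact ⟨hk, hpk⟩

-- a candidate with singleton diff list [k] IS the mutation of gene at k by its own char
lemma cand_char (g cs : List Char) (k : Nat) (hk : k < g.length) (hlen : cs.length = g.length)
    (hdiff : (List.range g.length).filter (fun j => decide (cs.getD j ' ' ≠ g.getD j ' ')) = [k]) :
    cs = mutL g (cs.getD k ' ') k ∧ cs.getD k ' ' ≠ g.getD k ' ' := by
  rw [filter_range_singleton] at hdiff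
  obtain ⟨_, hpk, huniq⟩ := hdiff
  have hne : cs.getD k ' ' ≠ g.getD k ' ' := by simpa using hpk
  refine ⟨?_, hne⟩
  apply List.ext_getElem?
  intro j
  by_cases hj : j < g.length
  · rw [List.getElem?_eq_getElem (by omega), mutL_get? g _ k hk j]
    by_cases hjk : j = k
    · subst hjk
      rw [if_pos rfl]
      congr 1
      exact (List.getD_eq_getElem cs ' ' (by omega)).symm
    · rw [if_neg hjk]
      have heq : cs.getD j ' ' = g.getD j ' ' := by
        by_contra hne'
        exact hjk (huniq j hj (by simpa using hne'))
      rw [List.getElem?_eq_getElem hj]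
      rw [List.getD_eq_getElem cs ' ' (by omega), List.getD_eq_getElem g ' ' hj] at heq
      rw [heq]
  · rw [List.getElem?_eq_none (by omega), List.getElem?_eq_none (by rw [mutL_length g _ k hk]; omega)]

lemma cand_char_rev (g : List Char) (c : Char) (k : Nat) (hk : k < g.length)
    (hne : g.getD k ' ' ≠ c) :
    (List.range g.length).filter (fun j => decide ((mutL g c k).getD j ' ' ≠ g.getD j ' ')) = [k] := by
  rw [filter_range_singleton]
  refine ⟨hk, ?_, ?_⟩
  · rw [mutL_getD g c k hk k hk, if_pos rfl]
    simpa using (Ne.symm hne)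
  · intro j hj hpj
    by_contra hjk
    rw [mutL_getD g c k hk j hj, if_neg hjk] at hpj
    simp at hpj

-- the step function building by_sub in B's port (with len(gene) evaluated)
def bStep (g : List Char) (d : PySem.Dict (Char × Int) String) (p : String × Int) :
    PySem.Dict (Char × Int) String :=
  if PySem.Str.len p.1 = ((g.length : Nat) : Int) then
    match (PySem.List.pyRange 0 ((g.length : Nat) : Int) 1).filter
        (fun i => PySem.List.pyGetD p.1.toList i ' ' ≠ PySem.List.pyGetD g i ' ') with
    | [i] => d.insert (PySem.List.pyGetD p.1.toList i ' ', i) p.1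
    | _ => d
  else d

-- when the bank entry is not the mutation of gene at k by c (or c is no change there),
-- bStep leaves key (c, k) alone
lemma bStep_get?_of_ne (g : List Char) (c : Char) (k : Nat) (_hk : k < g.length)
    (d : PySem.Dict (Char × Int) String) (p : String × Int)
    (h : p.1 ≠ String.ofList (mutL g c k) ∨ g.getD k ' ' = c) :
    PySem.Dict.get? (bStep g d p) (c, (k : Int)) = PySem.Dict.get? d (c, (k : Int)) := by
  unfold bStep
  by_cases hlen : PySem.Str.len p.1 = ((g.length : Nat) : Int)
  · rw [if_pos hlen]
    rw [diffs_eq g p.1.toList g.length]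
    rcases hfs : List.filter (fun j => decide (p.1.toList.getD j ' ' ≠ g.getD j ' ')) (List.range g.length) with _ | ⟨j, _ | _⟩
    · simp
    · simp only [List.map_cons, List.map_nil]
      have hjn : j < g.length := by
        rw [filter_range_singleton] at hfs; exact hfs.1
      have hlen' : p.1.toList.length = g.length := by
        rw [PySem.Str.len_eq] at hlen; exact_mod_cast hlen
      have hcc := cand_char g p.1.toList j hjn hlen' hfs
      rw [PySem.List.pyGetD_natCast]
      apply PySem.Dict.get?_insert_of_ne
      intro hkey
      have hc : c = p.1.toList.getD j ' ' := (Prod.mk.injEq _ _ _ _).mp hkey |>.1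
      have hkj : k = j := by
        have h2 := (Prod.mk.injEq _ _ _ _).mp hkey |>.2
        exact_mod_cast h2
      subst hkj
      rcases h with h | h
      · apply h
        have hply : p.1 = String.ofList p.1.toList := String.ofList_toList.symm
        rw [hply, hcc.1, ← hc]
      · exact hcc.2 (by rw [← hc, h])
    · simp
  · rw [if_neg hlen]

-- the bank entry equal to the mutation of gene at k by c (c a real change) sets key (c, k)
lemma bStep_get?_of_eq (g : List Char) (c : Char) (k : Nat) (hk : k < g.length)
    (d : PySem.Dict (Char × Int) String) (p : String × Int)
    (hpm : p.1 = String.ofList (mutL g c k)) (hgc : g.getD k ' ' ≠ c) :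
    PySem.Dict.get? (bStep g d p) (c, (k : Int)) = some p.1 := by
  unfold bStep
  have hpl : p.1.toList = mutL g c k := by rw [hpm]; simp
  have hlen : PySem.Str.len p.1 = ((g.length : Nat) : Int) := by
    rw [PySem.Str.len_eq, hpl, mutL_length g c k hk]
  rw [if_pos hlen, diffs_eq g p.1.toList g.length]
  have hfs : List.filter (fun j => decide (p.1.toList.getD j ' ' ≠ g.getD j ' ')) (List.range g.length) = [k] := by
    rw [hpl]; exact cand_char_rev g c k hk hgc
  rw [hfs]
  simp only [List.map_cons, List.map_nil]
  rw [PySem.List.pyGetD_natCast]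
  have : p.1.toList.getD k ' ' = c := by
    rw [hpl, mutL_getD g c k hk k hk, if_pos rfl]
  rw [this]
  exact PySem.Dict.get?_insert_self d (c, (k : Int)) p.1

-- characterisation of by_sub: key (c, k) is present iff gene mutated at k by c is a bank
-- key and c really differs from gene there; its value is that mutation.
lemma dict_get (g : List Char) (c : Char) (k : Nat) (hk : k < g.length)
    (bank : List (String × Int)) :
    PySem.Dict.get? (bank.foldl (bStep g) PySem.Dict.empty) (c, (k : Int)) =
      (if String.ofList (mutL g c k) ∈ bank.map Prod.fst ∧ g.getD k ' ' ≠ c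
       then some (String.ofList (mutL g c k)) else none) := by
  suffices h : ∀ (d : PySem.Dict (Char × Int) String),
      PySem.Dict.get? (bank.foldl (bStep g) d) (c, (k : Int)) =
      (if String.ofList (mutL g c k) ∈ bank.map Prod.fst ∧ g.getD k ' ' ≠ c
       then some (String.ofList (mutL g c k)) else PySem.Dict.get? d (c, (k : Int))) by
    rw [h]
    by_cases hc : String.ofList (mutL g c k) ∈ bank.map Prod.fst ∧ g.getD k ' ' ≠ c
    · rw [if_pos hc, if_pos hc]
    · rw [if_neg hc, if_neg hc]; simp
  induction bank with
  | nil => intro d; simp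
  | cons p rest ih =>
    intro d
    rw [List.foldl_cons, ih (bStep g d p)]
    by_cases hgc : g.getD k ' ' = c
    · rw [if_neg (fun h => h.2 hgc), if_neg (fun h => h.2 hgc)]
      exact bStep_get?_of_ne g c k hk d p (Or.inr hgc)
    · by_cases hpm : p.1 = String.ofList (mutL g c k)
      · have hmemc : String.ofList (mutL g c k) ∈ (p :: rest).map Prod.fst := by
          rw [List.map_cons, ← hpm]
          exact List.mem_cons_self
        rw [if_pos (show String.ofList (mutL g c k) ∈ (p :: rest).map Prod.fst ∧ g.getD k ' ' ≠ c from ⟨hmemc, hgc⟩)]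
        by_cases hr : String.ofList (mutL g c k) ∈ rest.map Prod.fst ∧ g.getD k ' ' ≠ c
        · rw [if_pos hr]
        · rw [if_neg hr, bStep_get?_of_eq g c k hk d p hpm hgc, hpm]
      · have hmem : String.ofList (mutL g c k) ∈ (p :: rest).map Prod.fst ↔
            String.ofList (mutL g c k) ∈ rest.map Prod.fst := by
          simp only [List.map_cons, List.mem_cons]
          constructor
          · rintro (h | h)
            · exact absurd h.symm hpm
            · exact h
          · exact Or.inr
        rw [bStep_get?_of_ne g c k hk d p (Or.inl hpm)]
        by_cases hr : String.ofList (mutL g c k) ∈ rest.map Prod.fst ∧ g.getD k ' ' ≠ c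
        · rw [if_pos hr, if_pos ⟨hmem.mpr hr.1, hr.2⟩]
        · rw [if_neg hr, if_neg (fun h => hr ⟨hmem.mp h.1, h.2⟩)]

-- ===== VERDICT (by name: the statement is the Claim_ definition above) =====
theorem succFunc_spec : Claim_equal_succFunc := by
  intro gene bank_dict _
  unfold Spec_succFunc
  show succFunc gene bank_dict = succFunc_alt gene bank_dict
  simp only [succFunc, succFunc_alt]
  set g := gene.toList with hg
  set n := g.length with hn
  have hlen : PySem.Str.len gene = ((n : Nat) : Int) := by
    rw [PySem.Str.len_eq]
  have hbs : bSubStep gene ((n : Nat) : Int) = bStep g := by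
    funext d p
    rw [bSubStep, bStep, hn, hg]
  rw [hlen, hbs]
  apply PySem.List.foldl_congr_mem
  intro acc c _
  rw [PySem.List.pyRange_zero_nat n, List.foldl_map, List.foldl_map]
  apply PySem.List.foldl_congr_mem
  intro vm k hkmem
  rw [List.mem_range] at hkmem
  -- A's candidate string is the mutation mutL g c k
  have h2 : PySem.List.slice g none (some (k : Int)) = g.take k := by
    rw [PySem.List.slice_to g (by positivity)]; simp
  have h3 : PySem.List.slice g (some ((k : Int) + 1)) none = g.drop (k + 1) := by
    rw [show ((k : Int) + 1) = ((k + 1 : Nat) : Int) by push_cast; ring]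
    rw [PySem.List.slice_from g (by positivity)]; simp
  have htemp : PySem.List.slice g none (some (k : Int)) ++ [c] ++ PySem.List.slice g (some ((k : Int) + 1)) none = mutL g c k := by
    rw [h2, h3, mutL]
    simp [List.append_assoc]
  rw [htemp, PySem.List.pyGetD_natCast, dict_get g c k hkmem bank_dict]
  by_cases hgc : g.getD k ' ' = c
  · rw [if_neg (by simpa using hgc), if_neg (fun h => h.2 hgc)]
  · rw [if_pos (by simpa using hgc)]
    by_cases hmem : String.ofList (mutL g c k) ∈ bank_dict.map Prod.fst
    · rw [if_pos (by simpa using hmem), if_pos ⟨hmem, hgc⟩]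
    · rw [if_neg (by simpa using hmem), if_neg (fun h => hmem h.1)]
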